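-- pv_equiv track=rewrite | github.com/colecperry/algorithms | LeetCode/string/1790.py | areAlmostEqual2
-- ===== SOURCE A (Python) =====
-- def areAlmostEqual2(s1: str, s2: str) -> bool: # Optimal O(n)
--     if s1 == s2: # Exit early if strings are ==
--         return True
--
--     mismatches = [] # List to store the positions where characters differ
--
--     for a, b in zip(s1, s2): # Compare characters from both strings
--         if a != b:
--             mismatches.append((a, b)) # Append a tuple
--
--     # To be one swap away:
--     if len(mismatches) == 2: # 1. Exactly two mismatched character pairs
--         return mismatches[0] == mismatches[1][::-1] # 2. Swapping those characters in s1 would make it equal to s2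
--
--     return False # If not exactly two mismatches, it's not fixable with one swap
-- ===== SOURCE B (Python) =====
-- def areAlmostEqual2(s1: str, s2: str) -> bool:
--     if s1 == s2:
--         return True
--     diff = 0
--     for a, b in zip(s1, s2):
--         if a != b:
--             diff += 1
--     return sorted(s1) == sorted(s2) and diff == 2
-- ===== Notes on version B (the rewrite author's own statement) =====
-- stated objective: idiomatic
-- what changed: B replaces A's mismatch-pair collection and tuple-reversal comparison by a multiset check: sorted(s1) == sorted(s2) together with a plain count of differing zipped positions equal to 2.
-- intended difference: On unequal-length strings whose common zipped prefix differs at exactly two positions that form a mutual swap (e.g. ('ab','bax')), A returns True because zip silently truncates, while B returns False, which is intended since strings of different lengths can never be equal after one swap. — e.g. on areAlmostEqual2("ab", "bax"): A returns true, B returns false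
import Mathlib
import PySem

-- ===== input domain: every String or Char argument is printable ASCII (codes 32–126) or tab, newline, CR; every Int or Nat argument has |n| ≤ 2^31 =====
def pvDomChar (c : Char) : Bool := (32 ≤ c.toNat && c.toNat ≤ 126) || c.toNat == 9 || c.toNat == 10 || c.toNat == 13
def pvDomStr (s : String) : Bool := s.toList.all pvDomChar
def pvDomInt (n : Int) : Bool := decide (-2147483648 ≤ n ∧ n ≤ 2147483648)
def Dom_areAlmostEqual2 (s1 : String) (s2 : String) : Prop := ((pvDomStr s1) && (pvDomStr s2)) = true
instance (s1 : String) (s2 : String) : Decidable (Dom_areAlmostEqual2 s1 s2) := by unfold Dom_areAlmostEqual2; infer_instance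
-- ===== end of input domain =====

-- B replaces A's mismatch-pair collection by a multiset check (sorted(s1)==sorted(s2) plus a
-- diff count of exactly 2); on unequal-length inputs B fixes A's zip-truncation bug (see D_ below).

-- ===== PORT A =====
def areAlmostEqual2 (s1 : String) (s2 : String) : Bool :=
  if s1 == s2 then true
  else
    let mismatches : List (Char × Char) :=
      (s1.toList.zip s2.toList).foldl
        (fun acc p => if p.1 != p.2 then acc ++ [p] else acc) []
    if mismatches.length == 2 then
      -- mismatches[0] == mismatches[1][::-1]
      match PySem.List.pyGet? mismatches 0, PySem.List.pyGet? mismatches 1 with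
      | some p, some q => p == (q.2, q.1)
      | _, _ => false
    else false

-- ===== PORT B =====
def areAlmostEqual2_alt (s1 : String) (s2 : String) : Bool :=
  if s1 == s2 then true
  else
    let diff : Int :=
      (s1.toList.zip s2.toList).foldl
        (fun d p => if p.1 != p.2 then d + 1 else d) 0
    (PySem.List.sorted s1.toList (fun c => c) false
       == PySem.List.sorted s2.toList (fun c => c) false) && (diff == 2)

-- ===== PRECONDITION & SPEC =====
-- helper used by D_: the k-th zipped character pair (defaulted; D_ only reads k < length)
def pvPairAt (z : List (Char × Char)) (k : Nat) : Char × Char := z.getD k (' ', ' ')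

-- On unequal-length strings whose common zipped prefix differs at exactly two positions forming a
-- mutual swap, A returns True (zip silently truncates) while B returns False, which is intended:
-- strings of different lengths can never be made equal by one swap.
def D_areAlmostEqual2 (s1 : String) (s2 : String) : Prop :=
  s1.toList.length ≠ s2.toList.length ∧
  (∃ i ∈ List.range (s1.toList.zip s2.toList).length,
   ∃ j ∈ List.range (s1.toList.zip s2.toList).length, i < j ∧
    (pvPairAt (s1.toList.zip s2.toList) i).1 ≠ (pvPairAt (s1.toList.zip s2.toList) i).2 ∧
    (pvPairAt (s1.toList.zip s2.toList) i).1 = (pvPairAt (s1.toList.zip s2.toList) j).2 ∧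
    (pvPairAt (s1.toList.zip s2.toList) j).1 = (pvPairAt (s1.toList.zip s2.toList) i).2 ∧
    ∀ k ∈ List.range (s1.toList.zip s2.toList).length, k ≠ i → k ≠ j →
      (pvPairAt (s1.toList.zip s2.toList) k).1 = (pvPairAt (s1.toList.zip s2.toList) k).2)
instance (s1 : String) (s2 : String) : Decidable (D_areAlmostEqual2 s1 s2) := by
  unfold D_areAlmostEqual2; infer_instance

def Spec_areAlmostEqual2 (s1 : String) (s2 : String) (out : Bool) : Prop :=
  ¬ D_areAlmostEqual2 s1 s2 → out = areAlmostEqual2_alt s1 s2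
instance (s1 : String) (s2 : String) (out : Bool) : Decidable (Spec_areAlmostEqual2 s1 s2 out) := by
  unfold Spec_areAlmostEqual2; infer_instance

def pvDiffWitness_areAlmostEqual2 : String × String := ("ab", "bax")
def pvDiffWitnessOut_areAlmostEqual2 : Bool × Bool := (true, false)

-- ===== CLAIM (what is proved, stated in full; the proofs are below) =====
def Claim_unchanged_areAlmostEqual2 : Prop := ∀ (s1 : String) (s2 : String), Dom_areAlmostEqual2 s1 s2 → Spec_areAlmostEqual2 s1 s2 (areAlmostEqual2 s1 s2)
def Claim_changed_areAlmostEqual2 : Prop := Dom_areAlmostEqual2 (pvDiffWitness_areAlmostEqual2.1) (pvDiffWitness_areAlmostEqual2.2) ∧ D_areAlmostEqual2 (pvDiffWitness_areAlmostEqual2.1) (pvDiffWitness_areAlmostEqual2.2) ∧ areAlmostEqual2 (pvDiffWitness_areAlmostEqual2.1) (pvDiffWitness_areAlmostEqual2.2) = pvDiffWitnessOut_areAlmostEqual2.1 ∧ areAlmostEqual2_alt (pvDiffWitness_areAlmostEqual2.1) (pvDiffWitness_areAlmostEqual2.2) = pvDiffWitnessOut_areAlmostEqual2.2 ∧ pvDiffWitnessOut_areAlmostEqual2.1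 ≠ pvDiffWitnessOut_areAlmostEqual2.2
def Claim_exact_areAlmostEqual2 : Prop := ∀ (s1 : String) (s2 : String), Dom_areAlmostEqual2 s1 s2 → D_areAlmostEqual2 s1 s2 → areAlmostEqual2 s1 s2 ≠ areAlmostEqual2_alt s1 s2

-- ===== LEMMAS AND PROOFS =====

-- the mismatch predicate produced by A's loop (proof-side abbreviation)
def mNe (p : Char × Char) : Bool := p.1 != p.2

theorem pvPairAt_lt {z : List (Char × Char)} {k : Nat} (h : k < z.length) : pvPairAt z k = z[k] :=
  List.getD_eq_getElem z _ h

@[simp] theorem pvPairAt_cons_zero (x : Char × Char) (t : List (Char × Char)) :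
    pvPairAt (x :: t) 0 = x := rfl

@[simp] theorem pvPairAt_cons_succ (x : Char × Char) (t : List (Char × Char)) (k : Nat) :
    pvPairAt (x :: t) (k + 1) = pvPairAt t k := by
  simp [pvPairAt]

theorem pv_filter_nil_iff (z : List (Char × Char)) :
    z.filter mNe = [] ↔ ∀ k, k < z.length → (pvPairAt z k).1 = (pvPairAt z k).2 := by
  rw [List.filter_eq_nil_iff]
  constructor
  · intro h k hk
    have hm := h z[k] (List.getElem_mem hk)
    simp only [mNe, bne_iff_ne, ne_eq, not_not] at hm
    rw [pvPairAt_lt hk]; exact hm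
  · intro h p hp
    obtain ⟨k, hk, rfl⟩ := List.mem_iff_getElem.mp hp
    have := h k hk
    rw [pvPairAt_lt hk] at this
    simp [mNe, this]

theorem pv_filter_singleton_iff (z : List (Char × Char)) (q : Char × Char) :
    z.filter mNe = [q] ↔ ∃ j, j < z.length ∧ pvPairAt z j = q ∧ q.1 ≠ q.2 ∧
      ∀ k, k < z.length → k ≠ j → (pvPairAt z k).1 = (pvPairAt z k).2 := by
  induction z with
  | nil => simp
  | cons x t ih =>
    by_cases hx : x.1 = x.2
    · rw [List.filter_cons_of_neg (by simp [mNe, hx])]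
      rw [ih]
      constructor
      · rintro ⟨j, hj, hq, hne, hall⟩
        refine ⟨j+1, by simp; omega, by simpa using hq, hne, ?_⟩
        intro k hk hkj
        match k with
        | 0 => simpa using hx
        | k+1 =>
          simp only [List.length_cons] at hk
          simpa using hall k (by omega) (by omega)
      · rintro ⟨j, hj, hq, hne, hall⟩
        simp only [List.length_cons] at hj
        match j with
        | 0 =>
          exfalso; apply hne
          have hxq : x = q := by simpa using hq
          rw [← hxq]; exact hx
        | j+1 =>
          refine ⟨j, by omega, by simpa using hq, hne, ?_⟩
          intro k hk hkj
          simpa using hall (k+1) (by simp; omega) (by omega)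
    · rw [List.filter_cons_of_pos (by simp [mNe, hx])]
      constructor
      · intro h
        injection h with hxq hft
        rw [pv_filter_nil_iff] at hft
        refine ⟨0, by simp, by simpa using hxq, by rw [← hxq]; exact hx, ?_⟩
        intro k hk hkj
        match k with
        | 0 => omega
        | k+1 =>
          simp only [List.length_cons] at hk
          simpa using hft k (by omega)
      · rintro ⟨j, hj, hq, hne, hall⟩
        simp only [List.length_cons] at hj
        match j with
        | 0 =>
          have hxq : x = q := by simpa using hq
          have hft : t.filter mNe = [] := by
            rw [pv_filter_nil_iff]
            intro k hk
            simpa using hall (k+1) (by simp; omega) (by omega)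
          rw [hxq, hft]
        | j+1 =>
          exfalso; apply hx
          simpa using hall 0 (by simp) (by omega)

theorem pv_filter_pair_iff (z : List (Char × Char)) (p q : Char × Char) :
    z.filter mNe = [p, q] ↔ ∃ i j, i < j ∧ j < z.length ∧
      pvPairAt z i = p ∧ pvPairAt z j = q ∧ p.1 ≠ p.2 ∧ q.1 ≠ q.2 ∧
      ∀ k, k < z.length → k ≠ i → k ≠ j → (pvPairAt z k).1 = (pvPairAt z k).2 := by
  induction z with
  | nil => simp
  | cons x t ih =>
    by_cases hx : x.1 = x.2
    · rw [List.filter_cons_of_neg (by simp [mNe, hx])]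
      rw [ih]
      constructor
      · rintro ⟨i, j, hij, hj, hp, hq, hnep, hneq, hall⟩
        refine ⟨i+1, j+1, by omega, by simp; omega,
          by simpa using hp, by simpa using hq, hnep, hneq, ?_⟩
        intro k hk hki hkj
        match k with
        | 0 => simpa using hx
        | k+1 =>
          simp only [List.length_cons] at hk
          simpa using hall k (by omega) (by omega) (by omega)
      · rintro ⟨i, j, hij, hj, hp, hq, hnep, hneq, hall⟩
        simp only [List.length_cons] at hj
        match i, j with
        | 0, _ =>
          exfalso; apply hnep
          have hxp : x = p := by simpa using hp
          rw [← hxp]; exact hx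
        | i+1, 0 => omega
        | i+1, j+1 =>
          refine ⟨i, j, by omega, by omega, by simpa using hp, by simpa using hq, hnep, hneq, ?_⟩
          intro k hk hki hkj
          simpa using hall (k+1) (by simp; omega) (by omega) (by omega)
    · rw [List.filter_cons_of_pos (by simp [mNe, hx])]
      constructor
      · intro h
        injection h with hxp hft
        rw [pv_filter_singleton_iff] at hft
        obtain ⟨j, hj, hq, hneq, hall⟩ := hft
        refine ⟨0, j+1, by omega, by simp; omega,
          by simpa using hxp, by simpa using hq, by rw [← hxp]; exact hx, hneq, ?_⟩
        intro k hk hki hkj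
        match k with
        | 0 => omega
        | k+1 =>
          simp only [List.length_cons] at hk
          simpa using hall k (by omega) (by omega)
      · rintro ⟨i, j, hij, hj, hp, hq, hnep, hneq, hall⟩
        simp only [List.length_cons] at hj
        match i, j with
        | i+1, _ =>
          exfalso; apply hx
          simpa using hall 0 (by simp) (by omega) (by omega)
        | 0, 0 => omega
        | 0, j+1 =>
          have hxp : x = p := by simpa using hp
          have hft : t.filter mNe = [q] := by
            rw [pv_filter_singleton_iff]
            refine ⟨j, by omega, by simpa using hq, hneq, ?_⟩
            intro k hk hkj
            simpa using hall (k+1) (by simp; omega) (by omega) (by omega)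
          rw [hxp, hft]

theorem pv_count_key (l1 : List Char) : ∀ (l2 : List Char), l1.length = l2.length → ∀ (c : Char),
    l1.count c + (((l1.zip l2).filter mNe).map Prod.snd).count c
      = l2.count c + (((l1.zip l2).filter mNe).map Prod.fst).count c := by
  induction l1 with
  | nil =>
    intro l2 h c
    have : l2 = [] := List.eq_nil_of_length_eq_zero h.symm
    simp [this]
  | cons a t1 ih =>
    intro l2 h c
    match l2 with
    | [] => simp at h
    | b :: t2 =>
      simp only [List.length_cons] at h
      have ih' := ih t2 (by omega) c
      by_cases hab : a = b
      · subst hab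
        rw [List.zip_cons_cons, List.filter_cons_of_neg (by simp [mNe])]
        simp only [List.count_cons]
        omega
      · rw [List.zip_cons_cons, List.filter_cons_of_pos (by simp [mNe, hab])]
        simp only [List.map_cons, List.count_cons]
        omega

theorem pv_perm_iff (l1 l2 : List Char) (h : l1.length = l2.length) :
    l1.Perm l2 ↔ (((l1.zip l2).filter mNe).map Prod.fst).Perm (((l1.zip l2).filter mNe).map Prod.snd) := by
  rw [List.perm_iff_count, List.perm_iff_count]
  constructor
  · intro hc c; have := pv_count_key l1 l2 h c; have := hc c; omega
  · intro hc c; have := pv_count_key l1 l2 h c; have := hc c; omega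

theorem pv_pair_perm (a1 b1 a2 b2 : Char) (h1 : a1 ≠ b1) (h2 : a2 ≠ b2) :
    ([a1, a2].Perm [b1, b2]) ↔ (a1, b1) = (b2, a2) := by
  constructor
  · intro hp
    have hb1 : b1 ∈ [a1, a2] := hp.mem_iff.mpr (by simp)
    have hb1' : b1 = a2 := by
      rcases List.mem_cons.mp hb1 with h | h
      · exact absurd h.symm h1
      · simpa using h
    subst hb1'
    have hc := List.perm_iff_count.mp hp a1
    simp only [List.count_cons, List.count_nil, beq_iff_eq] at hc
    have ha1 : a1 = b2 := by
      by_contra hne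
      split_ifs at hc <;> simp_all
    simp [ha1]
  · intro he
    rw [Prod.ext_iff] at he
    obtain ⟨h3, h4⟩ := he
    simp only at h3 h4
    subst h3; subst h4
    exact List.Perm.swap _ _ _

-- B's diff loop counts exactly the mismatching zipped positions
theorem pv_diff_count (z : List (Char × Char)) : ∀ (a : Int),
    z.foldl (fun d p => if p.1 != p.2 then d + 1 else d) a = a + ((z.filter mNe).length : Int) := by
  induction z with
  | nil => intro a; simp
  | cons x t ih =>
    intro a
    by_cases hx : x.1 = x.2
    · rw [List.foldl_cons, if_neg (by simp [hx]), List.filter_cons_of_neg (by simp [mNe, hx]), ih]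
    · rw [List.foldl_cons, if_pos (by simp [hx]), List.filter_cons_of_pos (by simp [mNe, hx]), ih]
      simp only [List.length_cons]
      push_cast
      ring

theorem pv_beq_decide {α : Type} [BEq α] [LawfulBEq α] [DecidableEq α] (x y : α) :
    (x == y) = decide (x = y) := by
  by_cases h : x = y <;> simp [h]

-- sorted(s1) == sorted(s2) is multiset equality
theorem pv_sorted_beq (l1 l2 : List Char) :
    ((PySem.List.sorted l1 (fun c => c) false == PySem.List.sorted l2 (fun c => c) false)) =
      decide (l1.Perm l2) := by
  rw [pv_beq_decide]
  exact decide_eq_decide.mpr (PySem.List.sorted_id_eq_sorted_id_iff_perm _ _)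

-- normal form of A outside the early-equal branch
theorem pv_A_eq (s1 s2 : String) (h : ¬ s1 = s2) :
    areAlmostEqual2 s1 s2 =
      (match (s1.toList.zip s2.toList).filter mNe with
       | [p, q] => p == (q.2, q.1)
       | _ => false) := by
  unfold areAlmostEqual2
  rw [if_neg (by simpa using h)]
  rw [PySem.List.foldl_append_if_eq_filter (fun p : Char × Char => p.1 != p.2), List.nil_append]
  have hmne : (fun p : Char × Char => p.1 != p.2) = mNe := rfl
  rw [hmne]
  generalize (s1.toList.zip s2.toList).filter mNe = F
  match F with
  | [] => rfl
  | [p] => rfl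
  | [p, q] => rfl
  | p :: q :: r :: t => rfl

-- normal form of B outside the early-equal branch
theorem pv_B_eq (s1 s2 : String) (h : ¬ s1 = s2) :
    areAlmostEqual2_alt s1 s2 =
      (decide (s1.toList.Perm s2.toList) &&
        ((((s1.toList.zip s2.toList).filter mNe).length : Int) == 2)) := by
  unfold areAlmostEqual2_alt
  rw [if_neg (by simpa using h)]
  rw [pv_diff_count, pv_sorted_beq]
  rw [zero_add]

-- ===== VERDICT (by name: the statement is the Claim_ definition above) =====
theorem areAlmostEqual2_spec : Claim_unchanged_areAlmostEqual2 := by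
  intro s1 s2 _
  unfold Spec_areAlmostEqual2
  intro hD
  by_cases heq : s1 = s2
  · unfold areAlmostEqual2 areAlmostEqual2_alt
    simp [heq]
  · rw [pv_A_eq s1 s2 heq, pv_B_eq s1 s2 heq]
    match hFpq : (s1.toList.zip s2.toList).filter mNe with
    | [] =>
      rw [show (((([] : List (Char × Char)).length : Int)) == 2) = false from by decide,
        Bool.and_false]
    | [p] =>
      rw [show ((([p] : List (Char × Char)).length : Int) == 2) = false from by simp,
        Bool.and_false]
    | p :: q :: r :: t =>
      have hlen3 : (((p :: q :: r :: t : List (Char × Char)).length : Int) == 2) = false := by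
        simp only [List.length_cons, beq_eq_false_iff_ne, ne_eq]
        intro hcast
        omega
      rw [hlen3, Bool.and_false]
    | [p, q] =>
      have hmemp : p ∈ (s1.toList.zip s2.toList).filter mNe := by rw [hFpq]; simp
      have hmemq : q ∈ (s1.toList.zip s2.toList).filter mNe := by rw [hFpq]; simp
      have hnep : p.1 ≠ p.2 := by
        have := (List.mem_filter.mp hmemp).2
        simpa [mNe] using this
      have hneq : q.1 ≠ q.2 := by
        have := (List.mem_filter.mp hmemq).2
        simpa [mNe] using this
      have hlen2 : ((([p, q] : List (Char × Char)).length : Int) == 2) = true := by simp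
      rw [hlen2, Bool.and_true]
      show (p == (q.2, q.1)) = decide (s1.toList.Perm s2.toList)
      rw [pv_beq_decide, decide_eq_decide]
      by_cases hlen : s1.toList.length = s2.toList.length
      · rw [pv_perm_iff _ _ hlen, hFpq]
        simp only [List.map_cons, List.map_nil]
        rw [pv_pair_perm p.1 p.2 q.1 q.2 hnep hneq]
      · constructor
        · intro hpq
          exfalso
          apply hD
          obtain ⟨i, j, hij, hj, hpi, hqj, _, _, hall⟩ :=
            (pv_filter_pair_iff (s1.toList.zip s2.toList) p q).mp hFpq
          refine ⟨hlen, ⟨i, List.mem_range.mpr (by omega), j, List.mem_range.mpr hj, hij, ?_, ?_, ?_, ?_⟩⟩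
          · rw [hpi]; exact hnep
          · rw [hpi, hqj]
            exact congrArg Prod.fst hpq
          · rw [hpi, hqj]
            exact (congrArg Prod.snd hpq).symm
          · intro k hk hki hkj
            rw [List.mem_range] at hk
            exact hall k hk hki hkj
        · intro hperm
          exact absurd hperm.length_eq hlen

theorem areAlmostEqual2_changed : Claim_changed_areAlmostEqual2 := by
  unfold Claim_changed_areAlmostEqual2; decide

theorem areAlmostEqual2_tight : Claim_exact_areAlmostEqual2 := by
  intro s1 s2 _ hD
  obtain ⟨hlen, hex⟩ := hD
  obtain ⟨i, hi, j, hj, hij, hne1, h12, h21, hall⟩ := hex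
  rw [List.mem_range] at hi hj
  have heq : ¬ s1 = s2 := fun h => hlen (by rw [h])
  have hne2 : (pvPairAt (s1.toList.zip s2.toList) j).1 ≠ (pvPairAt (s1.toList.zip s2.toList) j).2 := by
    intro h
    apply hne1
    rw [h12, ← h, ← h21]
  have hFpq : (s1.toList.zip s2.toList).filter mNe =
      [pvPairAt (s1.toList.zip s2.toList) i, pvPairAt (s1.toList.zip s2.toList) j] := by
    rw [pv_filter_pair_iff]
    exact ⟨i, j, hij, hj, rfl, rfl, hne1, hne2, fun k hk hki hkj =>
      hall k (List.mem_range.mpr hk) hki hkj⟩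
  rw [pv_A_eq s1 s2 heq, pv_B_eq s1 s2 heq, hFpq]
  have hBperm : decide (s1.toList.Perm s2.toList) = false := by
    simp only [decide_eq_false_iff_not]
    intro hperm
    exact hlen hperm.length_eq
  rw [hBperm, Bool.false_and]
  show (pvPairAt (s1.toList.zip s2.toList) i ==
    ((pvPairAt (s1.toList.zip s2.toList) j).2, (pvPairAt (s1.toList.zip s2.toList) j).1)) ≠ false
  rw [pv_beq_decide]
  simp only [ne_eq, decide_eq_false_iff_not, not_not]
  exact Prod.ext_iff.mpr ⟨h12, h21.symm⟩
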